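-- pv_equiv track=rewrite | github.com/dgsim126/codingTest | lv1/240908/모의고사.py | solution
-- ===== SOURCE A (Python) =====
-- def solution(answers):
--     answer= []
--     first= [1,2,3,4,5] # 5
--     second= [2,1,2,3,2,4,2,5] # 8
--     third= [3,3,1,1,2,2,4,4,5,5] # 10
--     result= {
--         1:0,
--         2:0,
--         3:0
--     }
--
--     for i in range(len(answers)):
--         # 0일때, 5일때
--         if(first[i%5]==answers[i]):
--             result[1]+=1
--
--         # 0일때, 8일때
--         if(second[i%8]==answers[i]):
--             result[2]+=1
--
--         # 0일때, 10일때
--         if(third[i%10]==answers[i]):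
--             result[3]+=1
--
--     max_= max(result.values()) # google's help(values()를 찾아봄)
--
--     for i in range(3):
--         if(max_==result[i+1]):
--             answer.append(i+1)
--
--     return answer
-- ===== SOURCE B (Python) =====
-- from collections import Counter
--
-- def solution(answers):
--     first = [1, 2, 3, 4, 5]
--     second = [2, 1, 2, 3, 2, 4, 2, 5]
--     third = [3, 3, 1, 1, 2, 2, 4, 4, 5, 5]
--     # One pass builds a histogram of answers keyed by (index mod 40, value);
--     # 40 = lcm(5, 8, 10), so every pattern is constant on each residue class mod 40.
--     # Each score is then 40 histogram lookups -- no per-pattern scan of answers.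
--     hist = Counter((i % 40, a) for i, a in enumerate(answers))
--     scores = [sum(hist[(r, pat[r % len(pat)])] for r in range(40))
--               for pat in (first, second, third)]
--     best = max(scores)
--     return [j + 1 for j, s in enumerate(scores) if s == best]
-- ===== Notes on version B (the rewrite author's own statement) =====
-- stated objective: alternative
-- what changed: Instead of checking all three patterns at every index in one fused loop, B builds in one pass a Counter histogram keyed by (index mod 40, answer) -- 40 = lcm of the pattern lengths -- and computes each supervisor's score as 40 histogram lookups, so no pattern is ever compared against the answers element-by-element; winners come from a filter over enumerate(scores).
import Mathlib
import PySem

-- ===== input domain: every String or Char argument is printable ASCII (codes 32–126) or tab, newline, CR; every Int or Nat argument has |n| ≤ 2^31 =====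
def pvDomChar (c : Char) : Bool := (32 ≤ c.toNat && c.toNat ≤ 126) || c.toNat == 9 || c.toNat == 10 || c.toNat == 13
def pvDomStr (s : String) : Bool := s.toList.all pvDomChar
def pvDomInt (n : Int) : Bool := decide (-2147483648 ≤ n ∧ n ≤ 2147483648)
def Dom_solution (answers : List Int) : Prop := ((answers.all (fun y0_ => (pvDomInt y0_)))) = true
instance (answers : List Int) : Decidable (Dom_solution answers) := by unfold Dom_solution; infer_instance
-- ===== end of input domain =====

-- B replaces A's fused per-index loop over three pattern checks by a single histogram
-- pass keyed by (index mod 40, answer) — 40 = lcm of the pattern lengths — followed by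
-- 40 lookups per pattern and a filter over the enumerated scores (alternative decomposition).

-- ===== PORT A =====

-- loop body of A's for-loop (result[j] += 1 guarded by the three pattern checks)
def aStep (answers : List Int) (d : PySem.Dict Int Int) (i : Int) : PySem.Dict Int Int :=
  let d1 := if PySem.List.pyGetD ([1,2,3,4,5] : List Int) (PySem.Int.mod i 5) 0 = PySem.List.pyGetD answers i 0
            then d.insert 1 ((d.get? 1).getD 0 + 1) else d
  let d2 := if PySem.List.pyGetD ([2,1,2,3,2,4,2,5] : List Int) (PySem.Int.mod i 8) 0 = PySem.List.pyGetD answers i 0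
            then d1.insert 2 ((d1.get? 2).getD 0 + 1) else d1
  if PySem.List.pyGetD ([3,3,1,1,2,2,4,4,5,5] : List Int) (PySem.Int.mod i 10) 0 = PySem.List.pyGetD answers i 0
  then d2.insert 3 ((d2.get? 3).getD 0 + 1) else d2

def solution (answers : List Int) : List Int :=
  let result : PySem.Dict Int Int :=
    (PySem.List.pyRange 0 answers.length 1).foldl (aStep answers)
      (PySem.Dict.ofList [(1, 0), (2, 0), (3, 0)])
  let max_ : Int := (PySem.List.max? result.values (fun v => v)).getD 0
  (PySem.List.pyRange 0 3 1).foldl (fun acc i =>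
    if max_ = (result.get? (i + 1)).getD 0 then acc ++ [i + 1] else acc) []

-- ===== PORT B =====

def solution_alt (answers : List Int) : List Int :=
  let first : List Int := [1,2,3,4,5]
  let second : List Int := [2,1,2,3,2,4,2,5]
  let third : List Int := [3,3,1,1,2,2,4,4,5,5]
  let hist : PySem.Dict (Int × Int) Int :=
    PySem.Dict.counter ((PySem.List.enumerate answers 0).map (fun p => (PySem.Int.mod p.1 40, p.2)))
  let scores : List Int :=
    [first, second, third].map (fun pat =>
      ((PySem.List.pyRange 0 40 1).map (fun r =>
        hist.getD (r, PySem.List.pyGetD pat (PySem.Int.mod r (pat.length : Int)) 0) 0)).sum)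
  let best : Int := (PySem.List.max? scores (fun v => v)).getD 0
  ((PySem.List.enumerate scores 0).filter (fun p => p.2 == best)).map (fun p => p.1 + 1)

-- ===== PRECONDITION & SPEC =====
def Spec_solution (answers : List Int) (out : List Int) : Prop := out = solution_alt answers
instance (answers : List Int) (out : List Int) : Decidable (Spec_solution answers out) := by unfold Spec_solution; infer_instance

-- ===== CLAIM (what is proved, stated in full; the proofs are below) =====
def Claim_equal_solution : Prop := ∀ (answers : List Int), Dom_solution answers → Spec_solution answers (solution answers)

-- ===== LEMMAS AND PROOFS =====

-- cyclic-match score: number of positions j with xs[j] = pat[(k+j) % len pat]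
def cycScore (pat : List Int) (i : Nat) (xs : List Int) : Int :=
  match xs with
  | [] => 0
  | a :: rest => (if a = pat.getD (i % pat.length) 0 then 1 else 0) + cycScore pat (i + 1) rest

theorem step_eval (answers : List Int) (k : Nat) (a c1 c2 c3 : Int)
    (hget : PySem.List.pyGetD answers (k : Int) 0 = a) :
    aStep answers (PySem.Dict.ofList [(1, c1), (2, c2), (3, c3)]) (k : Int)
    = PySem.Dict.ofList
        [(1, if List.getD ([1,2,3,4,5] : List Int) (k % 5) 0 = a then c1 + 1 else c1),
         (2, if List.getD ([2,1,2,3,2,4,2,5] : List Int) (k % 8) 0 = a then c2 + 1 else c2),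
         (3, if List.getD ([3,3,1,1,2,2,4,4,5,5] : List Int) (k % 10) 0 = a then c3 + 1 else c3)] := by
  have m5 : PySem.Int.mod (k : Int) 5 = ((k % 5 : Nat) : Int) := by
    rw [PySem.Int.mod_eq_emod_of_pos (by norm_num)]; omega
  have m8 : PySem.Int.mod (k : Int) 8 = ((k % 8 : Nat) : Int) := by
    rw [PySem.Int.mod_eq_emod_of_pos (by norm_num)]; omega
  have m10 : PySem.Int.mod (k : Int) 10 = ((k % 10 : Nat) : Int) := by
    rw [PySem.Int.mod_eq_emod_of_pos (by norm_num)]; omega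
  unfold aStep
  simp only [m5, m8, m10, PySem.List.pyGetD_natCast, hget]
  by_cases h1 : List.getD ([1,2,3,4,5] : List Int) (k % 5) 0 = a <;>
    by_cases h2 : List.getD ([2,1,2,3,2,4,2,5] : List Int) (k % 8) 0 = a <;>
      by_cases h3 : List.getD ([3,3,1,1,2,2,4,4,5,5] : List Int) (k % 10) 0 = a <;>
        simp only [h1, h2, h3, not_false_iff, if_neg, if_pos] <;> rfl

theorem comp_arith (g a c s : Int) :
    (if g = a then c + 1 else c) + s = c + ((if a = g then 1 else 0) + s) := by
  by_cases h : g = a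
  · rw [if_pos h, if_pos h.symm]; ring
  · rw [if_neg h, if_neg (fun hh => h hh.symm)]; ring

theorem loop_inv (answers : List Int) (xs : List Int) (k : Nat) (hx : answers.drop k = xs)
    (c1 c2 c3 : Int) :
    (PySem.List.pyRange (k : Int) answers.length 1).foldl (aStep answers)
      (PySem.Dict.ofList [(1, c1), (2, c2), (3, c3)])
    = PySem.Dict.ofList [(1, c1 + cycScore [1,2,3,4,5] k xs),
                         (2, c2 + cycScore [2,1,2,3,2,4,2,5] k xs),
                         (3, c3 + cycScore [3,3,1,1,2,2,4,4,5,5] k xs)] := by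
  induction xs generalizing k c1 c2 c3 with
  | nil =>
    have hk : answers.length ≤ k := List.drop_eq_nil_iff.mp hx
    rw [PySem.List.pyRange_one_eq_nil (by exact_mod_cast hk)]
    simp [cycScore]
  | cons a rest ih =>
    have hk : k < answers.length := by
      by_contra h
      rw [List.drop_eq_nil_iff.mpr (by omega)] at hx
      exact absurd hx (by simp)
    have ha : answers[k]? = some a := by
      have h0 : (answers.drop k)[0]? = some a := by rw [hx]; rfl
      rwa [List.getElem?_drop, Nat.add_zero] at h0
    have hrest : answers.drop (k + 1) = rest := by
      have h1 : (answers.drop k).drop 1 = rest := by rw [hx]; rfl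
      rwa [List.drop_drop] at h1
    have hget : PySem.List.pyGetD answers (k : Int) 0 = a := by
      simp [PySem.List.pyGetD_natCast, List.getD_eq_getElem?_getD, ha]
    rw [PySem.List.pyRange_one_cons (by exact_mod_cast hk), List.foldl_cons,
        step_eval answers k a c1 c2 c3 hget,
        show ((k : Int) + 1) = ((k + 1 : Nat) : Int) by push_cast; ring,
        ih (k + 1) hrest]
    have l5 : ([1,2,3,4,5] : List Int).length = 5 := rfl
    have l8 : ([2,1,2,3,2,4,2,5] : List Int).length = 8 := rfl
    have l10 : ([3,3,1,1,2,2,4,4,5,5] : List Int).length = 10 := rfl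
    simp only [cycScore, l5, l8, l10]
    rw [comp_arith, comp_arith, comp_arith]

-- indicator sum over a Nodup list of residues: at most one residue matches x
theorem sum_ind (f : Int → Int) (x : Int × Int) (R : List Int) (hR : R.Nodup) :
    (R.map (fun r => if (r, f r) = x then (1:Int) else 0)).sum
    = if x.1 ∈ R ∧ x.2 = f x.1 then 1 else 0 := by
  induction R with
  | nil => simp
  | cons r R' ih =>
    have hR' : R'.Nodup := (List.nodup_cons.mp hR).2
    have hnotm : r ∉ R' := (List.nodup_cons.mp hR).1
    by_cases h : (r, f r) = x
    · have hx1 : x.1 = r := (congrArg Prod.fst h).symm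
      have hx2 : x.2 = f x.1 := by rw [hx1]; exact (congrArg Prod.snd h).symm
      have hzero : (R'.map (fun r' => if (r', f r') = x then (1:Int) else 0)).sum = 0 := by
        rw [List.sum_eq_zero]
        intro y hy
        obtain ⟨r', hr', hy'⟩ := List.mem_map.mp hy
        have hne : ¬ (r', f r') = x := by
          intro he
          have hrr : r' = r := by
            have h1 : r' = x.1 := congrArg Prod.fst he
            rw [hx1] at h1; exact h1
          exact hnotm (hrr ▸ hr')
        rw [← hy', if_neg hne]
      rw [List.map_cons, List.sum_cons, if_pos h, hzero,
          if_pos ⟨by simp [hx1], hx2⟩]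
      norm_num
    · have hner : ¬ (x.1 = r ∧ x.2 = f x.1) := by
        rintro ⟨h1, h2⟩
        exact h (Prod.ext_iff.mpr ⟨h1.symm, by rw [h2, h1]⟩)
      rw [List.map_cons, List.sum_cons, if_neg h, zero_add, ih hR']
      by_cases hq : x.1 = r
      · have h2' : ¬ x.2 = f r := fun hh => hner ⟨hq, by rw [hq]; exact hh⟩
        simp [hq, h2']
      · simp [List.mem_cons, hq]

-- summing per-residue pair counts over distinct residues is one countP over the list
theorem sum_count_eq_countP (f : Int → Int) (R : List Int) (hR : R.Nodup) (m : List (Int × Int)) :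
    (R.map (fun r => ((m.count (r, f r)) : Int))).sum
    = (m.countP (fun p => decide (p.1 ∈ R) && (p.2 == f p.1)) : Int) := by
  induction m with
  | nil => simp
  | cons x m ih =>
    have hc : ∀ r : Int, (((x :: m).count (r, f r)) : Int)
        = ((m.count (r, f r)) : Int) + (if (r, f r) = x then (1:Int) else 0) := by
      intro r
      by_cases h : (r, f r) = x
      · simp [h]
      · have h' : ¬ x = (r, f r) := fun he => h he.symm
        simp [h, h']
    calc (R.map (fun r => (((x :: m).count (r, f r)) : Int))).sum
        = (R.map (fun r => ((m.count (r, f r)) : Int) + (if (r, f r) = x then (1:Int) else 0))).sum := by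
          exact congrArg List.sum (List.map_congr_left (fun r _ => hc r))
      _ = (R.map (fun r => ((m.count (r, f r)) : Int))).sum
          + (R.map (fun r => if (r, f r) = x then (1:Int) else 0)).sum := by
          rw [← List.sum_map_add]
      _ = _ := by
          rw [ih, sum_ind f x R hR, List.countP_cons]
          by_cases h1 : x.1 ∈ R <;> by_cases h2 : x.2 = f x.1 <;> simp [h1, h2]

-- countP of the cyclic-match predicate over enumerate IS cycScore
theorem countP_enum_cyc (pat : List Int) (xs : List Int) (k : Nat) :
    ((PySem.List.enumerate xs ((k : Nat) : Int)).countP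
        (fun q => q.2 == PySem.List.pyGetD pat (PySem.Int.mod q.1 (pat.length : Int)) 0) : Int)
    = cycScore pat k xs := by
  induction xs generalizing k with
  | nil => simp [PySem.List.enumerate_nil, cycScore]
  | cons a rest ih =>
    rw [PySem.List.enumerate_cons, List.countP_cons]
    have hmod : PySem.Int.mod ((k : Nat) : Int) ((pat.length : Nat) : Int)
        = ((k % pat.length : Nat) : Int) := PySem.Int.mod_natCast k pat.length
    have hidx : PySem.List.pyGetD pat (((k % pat.length : Nat) : Int)) 0
        = pat.getD (k % pat.length) 0 := PySem.List.pyGetD_natCast pat (k % pat.length) 0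
    have hk1 : ((k : Nat) : Int) + 1 = ((k + 1 : Nat) : Int) := by push_cast; ring
    rw [hk1] at *
    push_cast
    rw [show ((k:Int) + 1) = ((k + 1 : Nat) : Int) by push_cast; ring]
    simp only [cycScore, hmod, hidx]
    rw [← ih (k + 1)]
    push_cast
    by_cases h : a = pat.getD (k % pat.length) 0 <;> simp [h] <;> ring

-- a pattern whose length divides 40 has one histogram bucket per residue class mod 40
theorem score_eq (answers pat : List Int) (hdvd : pat.length ∣ 40) :
    ((PySem.List.pyRange 0 40 1).map (fun r =>
      (PySem.Dict.counter ((PySem.List.enumerate answers 0).map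
          (fun p => (PySem.Int.mod p.1 40, p.2)))).getD
        (r, PySem.List.pyGetD pat (PySem.Int.mod r (pat.length : Int)) 0) 0)).sum
    = cycScore pat 0 answers := by
  set f : Int → Int := fun r => PySem.List.pyGetD pat (PySem.Int.mod r (pat.length : Int)) 0 with hf
  set m := (PySem.List.enumerate answers 0).map (fun p => (PySem.Int.mod p.1 40, p.2)) with hm
  have h1 : ∀ r : Int, (PySem.Dict.counter m).getD (r, f r) 0 = (m.count (r, f r) : Int) := by
    intro r; exact_mod_cast PySem.Dict.getD_counter m (r, f r)
  rw [List.map_congr_left (fun r _ => h1 r)]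
  rw [sum_count_eq_countP f _ (PySem.List.nodup_pyRange_one 0 40) m]
  rw [hm, List.countP_map]
  have hcongr : (PySem.List.enumerate answers 0).countP
      ((fun p => decide (p.1 ∈ PySem.List.pyRange 0 40 1) && (p.2 == f p.1)) ∘
        (fun p => (PySem.Int.mod p.1 40, p.2)))
      = (PySem.List.enumerate answers 0).countP
        (fun q => q.2 == PySem.List.pyGetD pat (PySem.Int.mod q.1 (pat.length : Int)) 0) := by
    apply List.countP_congr
    intro p hp
    obtain ⟨j, hj, hpj⟩ := (PySem.List.mem_enumerate_iff _ _ _).mp hp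
    have hp1 : p.1 = ((j : Nat) : Int) := by rw [hpj]; simp
    have hmem : PySem.Int.mod p.1 40 ∈ PySem.List.pyRange 0 40 1 :=
      (PySem.List.mem_pyRange_one).mpr
        ⟨PySem.Int.mod_nonneg p.1 (by norm_num), PySem.Int.mod_lt p.1 (by norm_num)⟩
    have hdouble : PySem.Int.mod (PySem.Int.mod p.1 40) (pat.length : Int)
        = PySem.Int.mod p.1 (pat.length : Int) := by
      have h40 : (40 : Int) = ((40 : Nat) : Int) := by norm_num
      rw [hp1, h40, PySem.Int.mod_natCast, PySem.Int.mod_natCast, PySem.Int.mod_natCast,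
          Nat.mod_mod_of_dvd j hdvd]
    simp only [Function.comp, hmem, decide_true, Bool.true_and, hf, hdouble]
  rw [hcongr]
  have := countP_enum_cyc pat answers 0
  simpa using this

theorem tail_eq (s1 s2 s3 : Int) :
    (PySem.List.pyRange 0 3 1).foldl (fun acc i =>
      if (PySem.List.max? (PySem.Dict.ofList [((1:Int),s1),(2,s2),(3,s3)]).values (fun v => v)).getD 0
         = ((PySem.Dict.ofList [((1:Int),s1),(2,s2),(3,s3)]).get? (i+1)).getD 0
      then acc ++ [i+1] else acc) []
    = ((PySem.List.enumerate [s1,s2,s3] 0).filter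
        (fun p => p.2 == (PySem.List.max? [s1,s2,s3] (fun v => v)).getD 0)).map (fun p => p.1 + 1) := by
  have hv : (PySem.Dict.ofList [((1:Int),s1),(2,s2),(3,s3)]).values = [s1,s2,s3] := rfl
  have e : PySem.List.pyRange 0 3 1 = [(0:Int),1,2] := by decide
  have en : PySem.List.enumerate [s1,s2,s3] 0 = [((0:Int),s1),(1,s2),(2,s3)] := rfl
  have g1 : ((PySem.Dict.ofList [((1:Int),s1),(2,s2),(3,s3)]).get? ((0:Int)+1)).getD 0 = s1 := rfl
  have g2 : ((PySem.Dict.ofList [((1:Int),s1),(2,s2),(3,s3)]).get? ((1:Int)+1)).getD 0 = s2 := rfl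
  have g3 : ((PySem.Dict.ofList [((1:Int),s1),(2,s2),(3,s3)]).get? ((2:Int)+1)).getD 0 = s3 := rfl
  rw [e, en, hv]
  simp only [List.foldl_cons, List.foldl_nil, g1, g2, g3]
  simp only [List.filter_cons, List.filter_nil, beq_iff_eq]
  split_ifs <;> first | omega | simp [List.map]

theorem solution_spec' (answers : List Int) : solution answers = solution_alt answers := by
  have h0 := loop_inv answers answers 0 rfl 0 0 0
  simp only [Nat.cast_zero, zero_add] at h0
  have e1 := score_eq answers [1,2,3,4,5] (by norm_num)
  have e2 := score_eq answers [2,1,2,3,2,4,2,5] (by norm_num)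
  have e3 := score_eq answers [3,3,1,1,2,2,4,4,5,5] (by norm_num)
  unfold solution solution_alt
  simp only [List.map_cons, List.map_nil, h0, e1, e2, e3]
  exact tail_eq _ _ _

-- ===== VERDICT (by name: the statement is the Claim_ definition above) =====
theorem solution_spec : Claim_equal_solution := by
  intro answers _
  exact solution_spec' answers
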